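-- pv_equiv track=rewrite | github.com/MarekSvob/polyAfilter | RNAseqAnalysis.py | getTransStartEnding
-- ===== SOURCE A (Python) =====
-- def getTransStartEnding(exons, endLength, strd):
--     """Helper function to split a transcript represented by a list of exons
--     into an exon-wise start and ending of a given cumulative ending length.
--
--     Parameters
--     ----------
--     exons : (list)
--         The complete list of exons constituting a transcript: [ (start, end) ]
--     endLength : (int)
--         The total length of the exon-wise ending to be escaped before starts
--         are retained.
--     strd : (bool)
--         The strand on which the transcript is found.
--
--     Returns
--     -------
--     transStartPieces : (list)
--         [ (start, end) ]
--     transEndPieces : (list)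
--         [ (start, end) ]
--     """
--
--     # Initialize the lists of pieces
--     transStartPieces = []
--     transEndPieces = []
--     # Initiate how much is left to progress to escape the end
--     remaining = int(endLength)
--     # For each exon (ordered last-to-first wrt/ strand)
--     for eStart, eEnd in sorted(exons, reverse = strd):
--         # If end has not been escaped yet
--         if remaining > 0:
--             # Measure the size of the exon
--             exLen = eEnd - eStart
--             # If not longer than the remainder, add the entire exon to ends
--             if exLen <= remaining:
--                 transEndPieces.append((eStart, eEnd))
--             # Otherwise add the remainder to end pieces and the escaped part of
--             #  the exon to starts
--             else:
--                 transEndPieces.append((eEnd - remaining, eEnd) if strd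
--                                       else (eStart, eStart + remaining))
--                 transStartPieces.append((eStart, eEnd - remaining) if strd
--                                         else (eStart + remaining, eEnd))
--             # Either way, decrease the remainder by the exon length
--             remaining -= exLen
--         # Otherwise add the entire exon as is
--         else:
--             transStartPieces.append((eStart, eEnd))
--
--     return transStartPieces, transEndPieces
-- ===== SOURCE B (Python) =====
-- def getTransStartEnding(exons, endLength, strd):
--     """Split a sorted transcript's exons into start/end pieces: precompute the
--     'remaining' value in front of each exon once, then build each output list
--     independently with a stateless comprehension over the (exon, remaining)
--     pairs."""
--     ordered = sorted(exons, reverse=strd)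
--     rems = []
--     r = int(endLength)
--     for s, e in ordered:
--         rems.append(r)
--         if r > 0:
--             r -= e - s
--     transEndPieces = [
--         ((e - r, e) if strd else (s, s + r)) if e - s > r else (s, e)
--         for (s, e), r in zip(ordered, rems) if r > 0
--     ]
--     transStartPieces = [
--         (((s, e - r) if strd else (s + r, e)) if r > 0 else (s, e))
--         for (s, e), r in zip(ordered, rems) if r <= 0 or e - s > r
--     ]
--     return transStartPieces, transEndPieces
-- ===== Notes on version B (the rewrite author's own statement) =====
-- stated objective: alternative
-- what changed: A's single stateful loop carrying (starts, ends, remaining) is replaced by precomputing the 'remaining' value in front of each sorted exon once and then building the two output lists independently with stateless comprehensions over the (exon, remaining) pairs.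
import Mathlib
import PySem

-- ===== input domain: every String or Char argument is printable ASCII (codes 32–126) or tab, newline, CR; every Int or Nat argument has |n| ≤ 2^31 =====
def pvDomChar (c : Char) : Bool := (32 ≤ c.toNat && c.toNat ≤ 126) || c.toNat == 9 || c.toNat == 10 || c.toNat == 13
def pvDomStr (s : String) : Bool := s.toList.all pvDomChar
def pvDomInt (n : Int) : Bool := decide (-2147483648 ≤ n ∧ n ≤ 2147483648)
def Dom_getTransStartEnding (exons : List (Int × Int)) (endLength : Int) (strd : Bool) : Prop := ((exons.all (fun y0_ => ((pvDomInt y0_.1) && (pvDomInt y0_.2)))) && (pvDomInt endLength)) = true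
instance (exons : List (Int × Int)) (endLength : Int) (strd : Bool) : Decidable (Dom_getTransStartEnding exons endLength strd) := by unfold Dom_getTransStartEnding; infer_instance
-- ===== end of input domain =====

-- B re-decomposes A's stateful loop: it precomputes the per-exon 'remaining' values
-- once, then builds the two output lists independently by stateless filterMap passes
-- (objective: alternative decomposition, same asymptotic cost).

-- ===== PORT A =====
-- A: single fold over the sorted exons carrying (starts, ends, remaining).
def getTransStartEnding (exons : List (Int × Int)) (endLength : Int) (strd : Bool) : (List (Int × Int)) × (List (Int × Int)) :=
  let res := (PySem.List.sorted2 exons Prod.fst Prod.snd (reverse := strd)).foldl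
    (fun (st : List (Int × Int) × List (Int × Int) × Int) p =>
      let starts := st.1; let ends := st.2.1; let remaining := st.2.2
      let eStart := p.1; let eEnd := p.2
      if remaining > 0 then
        let exLen := eEnd - eStart
        if exLen ≤ remaining then
          (starts, ends ++ [(eStart, eEnd)], remaining - exLen)
        else
          (starts ++ [if strd then (eStart, eEnd - remaining) else (eStart + remaining, eEnd)],
           ends ++ [if strd then (eEnd - remaining, eEnd) else (eStart, eStart + remaining)],
           remaining - exLen)
      else
        (starts ++ [(eStart, eEnd)], ends, remaining))
    ([], [], endLength)
  (res.1, res.2.1)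

-- ===== PORT B =====
-- B helper: the 'remaining' value in front of each exon (r only shrinks while positive).
def altRems (r : Int) (l : List (Int × Int)) : List Int :=
  match l with
  | [] => []
  | (s, e) :: t => r :: altRems (if r > 0 then r - (e - s) else r) t

def getTransStartEnding_alt (exons : List (Int × Int)) (endLength : Int) (strd : Bool) : (List (Int × Int)) × (List (Int × Int)) :=
  let ordered := PySem.List.sorted2 exons Prod.fst Prod.snd (reverse := strd)
  let rems := altRems endLength ordered
  let transEndPieces := (ordered.zip rems).filterMap
    (fun q =>
      let s := q.1.1; let e := q.1.2; let r := q.2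
      if r > 0 then
        some (if e - s > r then (if strd then (e - r, e) else (s, s + r)) else (s, e))
      else none)
  let transStartPieces := (ordered.zip rems).filterMap
    (fun q =>
      let s := q.1.1; let e := q.1.2; let r := q.2
      if r ≤ 0 ∨ e - s > r then
        some (if r > 0 then (if strd then (s, e - r) else (s + r, e)) else (s, e))
      else none)
  (transStartPieces, transEndPieces)

-- ===== PRECONDITION & SPEC =====
def Spec_getTransStartEnding (exons : List (Int × Int)) (endLength : Int) (strd : Bool) (out : (List (Int × Int)) × (List (Int × Int))) : Prop := out = getTransStartEnding_alt exons endLength strd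
instance (exons : List (Int × Int)) (endLength : Int) (strd : Bool) (out : (List (Int × Int)) × (List (Int × Int))) : Decidable (Spec_getTransStartEnding exons endLength strd out) := by unfold Spec_getTransStartEnding; infer_instance

-- ===== CLAIM (what is proved, stated in full; the proofs are below) =====
def Claim_equal_getTransStartEnding : Prop := ∀ (exons : List (Int × Int)) (endLength : Int) (strd : Bool), Dom_getTransStartEnding exons endLength strd → Spec_getTransStartEnding exons endLength strd (getTransStartEnding exons endLength strd)

-- ===== LEMMAS AND PROOFS =====

-- The core invariant: A's fold from state (S, E, r) over any list l appends exactly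
-- B's two filterMap results over (l.zip (altRems r l)), and ends with remaining
-- as altRems would continue it.
theorem foldl_eq_filterMaps (strd : Bool) (l : List (Int × Int)) :
    ∀ (S E : List (Int × Int)) (r : Int),
    l.foldl
      (fun (st : List (Int × Int) × List (Int × Int) × Int) p =>
        let starts := st.1; let ends := st.2.1; let remaining := st.2.2
        let eStart := p.1; let eEnd := p.2
        if remaining > 0 then
          let exLen := eEnd - eStart
          if exLen ≤ remaining then
            (starts, ends ++ [(eStart, eEnd)], remaining - exLen)
          else
            (starts ++ [if strd then (eStart, eEnd - remaining) else (eStart + remaining, eEnd)],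
             ends ++ [if strd then (eEnd - remaining, eEnd) else (eStart, eStart + remaining)],
             remaining - exLen)
        else
          (starts ++ [(eStart, eEnd)], ends, remaining))
      (S, E, r)
    = (S ++ (l.zip (altRems r l)).filterMap
        (fun q =>
          let s := q.1.1; let e := q.1.2; let r := q.2
          if r ≤ 0 ∨ e - s > r then
            some (if r > 0 then (if strd then (s, e - r) else (s + r, e)) else (s, e))
          else none),
       E ++ (l.zip (altRems r l)).filterMap
        (fun q =>
          let s := q.1.1; let e := q.1.2; let r := q.2
          if r > 0 then
            some (if e - s > r then (if strd then (e - r, e) else (s, s + r)) else (s, e))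
          else none),
       (l.foldl (fun acc p => if acc > 0 then acc - (p.2 - p.1) else acc) r)) := by
  induction l with
  | nil => intro S E r; simp [altRems]
  | cons p t ih =>
    intro S E r
    obtain ⟨s, e⟩ := p
    by_cases hr : r > 0
    · by_cases hle : e - s ≤ r
      · have hnot : ¬ (r ≤ 0 ∨ e - s > r) := by omega
        simp only [List.foldl_cons, altRems, List.zip_cons_cons, List.filterMap_cons]
        rw [ih]
        simp only [hr, hle, hnot]
        simp [hle]
      · have hor : (r ≤ 0 ∨ e - s > r) := by omega
        simp only [List.foldl_cons, altRems, List.zip_cons_cons, List.filterMap_cons]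
        rw [ih]
        simp only [hr, hle, hor]
        simp [hle]
    · have hor : (r ≤ 0 ∨ e - s > r) := by omega
      have hr' : ¬ (r > 0) := hr
      simp only [List.foldl_cons, altRems, List.zip_cons_cons, List.filterMap_cons]
      rw [ih]
      simp [hr', hor]

-- ===== VERDICT (by name: the statement is the Claim_ definition above) =====
theorem getTransStartEnding_spec : Claim_equal_getTransStartEnding := by
  intro exons endLength strd _
  unfold Spec_getTransStartEnding getTransStartEnding getTransStartEnding_alt
  rw [foldl_eq_filterMaps]
  simp
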